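-- pv_equiv track=rewrite | github.com/AnaisFarr/bioptim | bioptim/gui/graph.py | _vector_layout
-- ===== SOURCE A (Python) =====
-- def _vector_layout(vector: list, size: int):
--     """
--     Resize vector content for display task
--
--     Parameters
--     ----------
--     vector: list
--         The vector to be condensed
--     size: int
--         The size of the vector
--     """
--
--     if size > 1:
--         condensed_vector = "[ "
--         count = 0
--         for var in vector:
--             count += 1
--             condensed_vector += f"{float(var)} "
--             if count == 5:
--                 condensed_vector += f"... <br/>... "
--                 count = 0
--         condensed_vector += "]<sup>T</sup>"
--     else:
--         condensed_vector = f"{float(vector[0])}"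
--     return condensed_vector
-- ===== SOURCE B (Python) =====
-- def _fmt_chunk(chunk):
--     """Render every element of a (short) chunk as 'float '."""
--     if not chunk:
--         return ""
--     return f"{float(chunk[0])} " + _fmt_chunk(chunk[1:])
--
--
-- def _vector_layout(vector: list, size: int):
--     if size <= 1:
--         return f"{float(vector[0])}"
--     body = ""
--     for i in range(0, len(vector), 5):
--         chunk = vector[i:i + 5]
--         body += _fmt_chunk(chunk)
--         if len(chunk) == 5:
--             body += "... <br/>... "
--     return "[ " + body + "]<sup>T</sup>"
-- ===== Notes on version B (the rewrite author's own statement) =====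
-- stated objective: alternative
-- what changed: Replaced A's single counter-driven loop (count reset at 5 inside one string accumulator) by a recursive decomposition: the vector is split into chunks of 5 via slices, each chunk rendered by a small recursive formatter, full chunks followed by the separator.
-- outside the precondition, e.g. on _vector_layout([], 0): A raises IndexError, B raises IndexError
import Mathlib
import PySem

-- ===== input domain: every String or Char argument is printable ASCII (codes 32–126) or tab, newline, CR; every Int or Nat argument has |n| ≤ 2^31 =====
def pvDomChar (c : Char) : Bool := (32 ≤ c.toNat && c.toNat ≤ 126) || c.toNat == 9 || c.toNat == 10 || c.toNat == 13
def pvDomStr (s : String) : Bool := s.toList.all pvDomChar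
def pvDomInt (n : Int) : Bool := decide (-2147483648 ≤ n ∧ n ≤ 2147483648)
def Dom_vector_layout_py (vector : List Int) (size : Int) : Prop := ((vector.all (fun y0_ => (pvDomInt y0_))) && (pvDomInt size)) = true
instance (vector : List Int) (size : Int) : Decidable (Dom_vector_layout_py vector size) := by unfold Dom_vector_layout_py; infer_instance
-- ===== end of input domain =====

-- ===== PORT A =====
-- B differs from A by a recursive chunks-of-5 decomposition instead of A's single counter loop (objective: alternative).
-- shared helper: Python's f"{float(var)}" on an int |n| ≤ 2^31 prints str(n) followed by ".0" (exact on Dom)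
def fmtFloat (n : Int) : String := PySem.Int.toStr n ++ ".0"

def vector_layout_py (vector : List Int) (size : Int) : String :=
  if size > 1 then
    let st := vector.foldl (fun (st : String × Int) var =>
      let count := st.2 + 1
      let s := st.1 ++ fmtFloat var ++ " "
      if count = 5 then (s ++ "... <br/>... ", (0 : Int)) else (s, count)) ("[ ", (0 : Int))
    st.1 ++ "]<sup>T</sup>"
  else
    -- vector[0]: IndexError on [] is excluded by Pre_
    fmtFloat ((PySem.List.pyGet? vector 0).getD 0)

-- ===== PORT B =====
def fmtChunk : List Int → String
  | [] => ""
  | x :: rest => fmtFloat x ++ " " ++ fmtChunk rest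

def vector_layout_py_alt (vector : List Int) (size : Int) : String :=
  if size ≤ 1 then
    -- vector[0]: IndexError on [] is excluded by Pre_
    fmtFloat ((PySem.List.pyGet? vector 0).getD 0)
  else
    let body := (PySem.List.pyRange 0 vector.length 5).foldl (fun acc i =>
      let chunk := PySem.List.slice vector (some i) (some (i + 5))
      let acc := acc ++ fmtChunk chunk
      if chunk.length = 5 then acc ++ "... <br/>... " else acc) ""
    "[ " ++ body ++ "]<sup>T</sup>"

-- ===== PRECONDITION & SPEC =====
-- Pre_ excludes only the inputs where A raises IndexError: size ≤ 1 with an empty vector.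
def Pre_vector_layout_py (vector : List Int) (size : Int) : Prop := size > 1 ∨ vector ≠ []
instance (vector : List Int) (size : Int) : Decidable (Pre_vector_layout_py vector size) := by
  unfold Pre_vector_layout_py; infer_instance
def pvWitness_vector_layout_py : List Int × Int := ([1, 2, 3, 4, 5, 6], 6)

def Spec_vector_layout_py (vector : List Int) (size : Int) (out : String) : Prop := out = vector_layout_py_alt vector size
instance (vector : List Int) (size : Int) (out : String) : Decidable (Spec_vector_layout_py vector size out) := by unfold Spec_vector_layout_py; infer_instance

-- ===== CLAIM (what is proved, stated in full; the proofs are below) =====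
def Claim_equal_vector_layout_py : Prop := ∀ (vector : List Int) (size : Int), Dom_vector_layout_py vector size → Pre_vector_layout_py vector size → Spec_vector_layout_py vector size (vector_layout_py vector size)

-- ===== LEMMAS AND PROOFS =====

-- A's loop step, named for the proofs
def stepA (st : String × Int) (var : Int) : String × Int :=
  let count := st.2 + 1
  let s := st.1 ++ fmtFloat var ++ " "
  if count = 5 then (s ++ "... <br/>... ", (0 : Int)) else (s, count)

-- B's loop step over the chunk start index, named for the proofs
def stepB (v : List Int) (acc : String) (i : Int) : String :=
  let chunk := PySem.List.slice v (some i) (some (i + 5))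
  let acc := acc ++ fmtChunk chunk
  if chunk.length = 5 then acc ++ "... <br/>... " else acc

-- common reference form: the vector rendered in chunks of 5
def chunksR (v : List Int) : String :=
  if v.length < 5 then fmtChunk v
  else fmtChunk (v.take 5) ++ "... <br/>... " ++ chunksR (v.drop 5)
  termination_by v.length
  decreasing_by simp; omega

theorem foldA_shift (v : List Int) : ∀ (s t : String) (c : Int),
    v.foldl stepA (s ++ t, c) = (s ++ (v.foldl stepA (t, c)).1, (v.foldl stepA (t, c)).2) := by
  induction v with
  | nil => intro s t c; simp
  | cons x xs ih =>
      intro s t c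
      simp only [List.foldl_cons, stepA]
      split
      · rw [show (s ++ t) ++ fmtFloat x ++ " " ++ "... <br/>... "
              = s ++ (t ++ fmtFloat x ++ " " ++ "... <br/>... ") by
            simp [String.append_assoc]]
        exact ih s _ 0
      · rw [show (s ++ t) ++ fmtFloat x ++ " " = s ++ (t ++ fmtFloat x ++ " ") by
            simp [String.append_assoc]]
        exact ih s _ _

theorem foldA_shift' (v : List Int) (s : String) (c : Int) :
    v.foldl stepA (s, c) = (s ++ (v.foldl stepA ("", c)).1, (v.foldl stepA ("", c)).2) := by
  have := foldA_shift v s "" c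
  simpa using this

theorem foldA_small (v : List Int) : ∀ (c : Int), 0 ≤ c → c + v.length < 5 →
    v.foldl stepA ("", c) = (fmtChunk v, c + v.length) := by
  induction v with
  | nil => intro c _ _; simp [fmtChunk]
  | cons x xs ih =>
      intro c hc hlen
      simp only [List.foldl_cons, stepA]
      have hne : ¬ (c + 1 = 5) := by simp at hlen; omega
      rw [if_neg hne]
      simp only [String.empty_append]
      rw [foldA_shift' xs (fmtFloat x ++ " ") (c + 1),
          ih (c + 1) (by omega) (by simp at hlen ⊢; omega)]
      simp [fmtChunk, String.append_assoc]
      omega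

theorem foldA_chunks (n : Nat) : ∀ (v : List Int), v.length = n →
    (v.foldl stepA ("", 0)).1 = chunksR v := by
  induction n using Nat.strong_induction_on with
  | _ n ih =>
    intro v hlen
    by_cases h : v.length < 5
    · rw [chunksR, if_pos h, foldA_small v 0 le_rfl (by omega)]
    · obtain ⟨a, b, c, d, e, rest, rfl⟩ :
          ∃ a b c d e rest, v = a :: b :: c :: d :: e :: rest := by
        match v with
        | a :: b :: c :: d :: e :: rest => exact ⟨a, b, c, d, e, rest, rfl⟩
        | [] | [_] | [_, _] | [_, _, _] | [_, _, _, _] => simp at h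
      rw [chunksR]
      have hlen5 : ¬ ((a :: b :: c :: d :: e :: rest).length < 5) := by simp
      rw [if_neg hlen5]
      simp only [List.foldl_cons]
      have h5 : stepA (stepA (stepA (stepA (stepA ("", 0) a) b) c) d) e
          = (fmtChunk [a, b, c, d, e] ++ "... <br/>... ", 0) := by
        simp [stepA, fmtChunk, String.append_assoc]
      rw [h5, foldA_shift' rest (fmtChunk [a, b, c, d, e] ++ "... <br/>... ") 0]
      have hrest := ih rest.length (by simp at hlen ⊢; omega) rest rfl
      show (fmtChunk [a, b, c, d, e] ++ "... <br/>... ") ++ (rest.foldl stepA ("", 0)).1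
          = fmtChunk ((a :: b :: c :: d :: e :: rest).take 5) ++ "... <br/>... "
            ++ chunksR ((a :: b :: c :: d :: e :: rest).drop 5)
      rw [hrest]
      simp [String.append_assoc]

theorem slice_shift (v : List Int) (a b : Int) (ha : 0 ≤ a) (hb : 0 ≤ b) :
    PySem.List.slice v (some (a + 5)) (some (b + 5))
      = PySem.List.slice (v.drop 5) (some a) (some b) := by
  rw [PySem.List.slice_toNat (a := a + 5) (b := b + 5) v (by omega) (by omega),
      PySem.List.slice_toNat (a := a) (b := b) (v.drop 5) ha hb, List.drop_drop]
  congr 1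
  · omega
  · congr 1; omega

theorem foldB_chunks (n : Nat) : ∀ (v : List Int), v.length = n → ∀ (acc : String),
    (PySem.List.pyRange 0 (v.length : Int) 5).foldl (stepB v) acc = acc ++ chunksR v := by
  induction n using Nat.strong_induction_on with
  | _ n ih =>
    intro v hlen acc
    rw [PySem.List.pyRange_of_pos 0 (v.length : Int) (by norm_num)]
    by_cases h0 : v.length = 0
    · obtain rfl : v = [] := List.length_eq_zero_iff.mp h0
      rw [chunksR]
      simp [fmtChunk]
    by_cases h : v.length < 5
    · have hcnt : (if (0 : Int) < (v.length : Int) then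
            (((v.length : Int) - 0 + 5 - 1) / 5).toNat else 0) = 1 := by
        rw [if_pos (by omega)]; omega
      rw [hcnt]
      have hsl : PySem.List.slice v (some 0) (some (0 + 5)) = v.take 5 := by
        rw [PySem.List.slice_toNat (a := 0) (b := 0 + 5) v (by norm_num) (by norm_num)]
        simp
      show stepB v acc (0 + 5 * ((0 : Nat) : Int)) = acc ++ chunksR v
      rw [chunksR, if_pos h]
      unfold stepB
      rw [show ((0 : Int) + 5 * ((0 : Nat) : Int)) = 0 by norm_num, hsl,
          if_neg (by simp; omega), List.take_of_length_le (by omega)]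
    · have hcnt : (if (0 : Int) < (v.length : Int) then
            (((v.length : Int) - 0 + 5 - 1) / 5).toNat else 0)
          = (((((v.drop 5).length : Int)) - 0 + 5 - 1) / 5).toNat + 1 := by
        rw [if_pos (by omega)]
        simp only [List.length_drop]
        omega
      rw [hcnt, List.range_succ_eq_map, List.map_cons, List.foldl_cons, List.map_map,
          List.foldl_map]
      simp only [Function.comp]
      have hstep1 : stepB v acc (0 + 5 * ((0 : Nat) : Int)) =
          acc ++ fmtChunk (v.take 5) ++ "... <br/>... " := by
        unfold stepB
        have hsl : PySem.List.slice v (some 0) (some (0 + 5)) = v.take 5 := by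
          rw [PySem.List.slice_toNat (a := 0) (b := 0 + 5) v (by norm_num) (by norm_num)]
          simp
        rw [show ((0 : Int) + 5 * ((0 : Nat) : Int)) = 0 by norm_num, hsl,
            if_pos (by simp; omega)]
      have hfun : (fun (acc : String) (k : Nat) => stepB v acc (0 + 5 * (k.succ : Int)))
          = (fun (acc : String) (k : Nat) => stepB (v.drop 5) acc (0 + 5 * (k : Int))) := by
        funext acc k
        unfold stepB
        have := slice_shift v (5 * (k : Int)) (5 * (k : Int) + 5) (by positivity) (by positivity)
        rw [show (0 : Int) + 5 * (k.succ : Int) = 5 * (k : Int) + 5 by push_cast; ring,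
            show (5 : Int) * (k : Int) + 5 + 5 = (5 * (k : Int) + 5) + 5 by ring, this,
            show (0 : Int) + 5 * (k : Int) = 5 * (k : Int) by ring]
      have hrange : (List.range ((((v.drop 5).length : Int) - 0 + 5 - 1) / 5).toNat).map
            (fun (k : Nat) => (0 : Int) + 5 * (k : Int))
          = PySem.List.pyRange 0 ((v.drop 5).length : Int) 5 := by
        rw [PySem.List.pyRange_of_pos 0 ((v.drop 5).length : Int) (by norm_num)]
        by_cases hd : (v.drop 5).length = 0
        · simp [hd]
        · rw [if_pos (by simp at hd ⊢; omega)]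
      calc (List.range ((((v.drop 5).length : Int) - 0 + 5 - 1) / 5).toNat).foldl
            (fun (acc : String) (k : Nat) => stepB v acc (0 + 5 * ((k.succ : Nat) : Int)))
            (stepB v acc (0 + 5 * ((0 : Nat) : Int)))
          = (List.range ((((v.drop 5).length : Int) - 0 + 5 - 1) / 5).toNat).foldl
            (fun (acc : String) (k : Nat) => stepB (v.drop 5) acc (0 + 5 * (k : Int)))
            (acc ++ fmtChunk (v.take 5) ++ "... <br/>... ") := by rw [hstep1, hfun]
        _ = (PySem.List.pyRange 0 ((v.drop 5).length : Int) 5).foldl (stepB (v.drop 5))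
            (acc ++ fmtChunk (v.take 5) ++ "... <br/>... ") := by
            rw [← hrange, List.foldl_map]
        _ = (acc ++ fmtChunk (v.take 5) ++ "... <br/>... ") ++ chunksR (v.drop 5) := by
            exact ih (v.drop 5).length (by simp; omega) (v.drop 5) rfl _
        _ = acc ++ chunksR v := by
            conv_rhs => rw [chunksR]
            rw [if_neg h]
            simp [String.append_assoc]

-- ===== VERDICT (by name: the statement is the Claim_ definition above) =====
theorem vector_layout_py_spec : Claim_equal_vector_layout_py := by
  intro vector size _ _
  unfold Spec_vector_layout_py vector_layout_py vector_layout_py_alt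
  by_cases h : size > 1
  · rw [if_pos h, if_neg (by omega)]
    show (vector.foldl stepA ("[ ", 0)).1 ++ "]<sup>T</sup>"
        = "[ " ++ (PySem.List.pyRange 0 (vector.length : Int) 5).foldl (stepB vector) ""
          ++ "]<sup>T</sup>"
    rw [foldA_shift' vector "[ " 0, foldA_chunks vector.length vector rfl,
        foldB_chunks vector.length vector rfl "", String.append_assoc,
        ← String.append_assoc]
    simp
  · rw [if_neg h, if_pos (by omega)]
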